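-- pv_equiv track=rewrite | github.com/Questi0nM4rk/ai-guardrails | lib/python/coderabbit_parser.py | strip_blockquote_prefixes
-- ===== SOURCE A (Python) =====
-- def strip_blockquote_prefixes(text: str) -> str:
--     """Remove blockquote prefixes (> ) from text lines.
--
--     Outside diff sections are often quoted with > prefixes.
--
--     Args:
--         text: Text potentially with blockquote prefixes
--
--     Returns:
--         Text with prefixes stripped
--     """
--     lines = text.split("\n")
--     cleaned = []
--     for line in lines:
--         # Strip leading > and optional space, repeatedly for nested quotes
--         while line.startswith(">"):
--             line = line[1:].lstrip(" ")
--         cleaned.append(line)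
--     return "\n".join(cleaned)
-- ===== SOURCE B (Python) =====
-- def strip_blockquote_prefixes(text: str) -> str:
--     """Remove blockquote prefixes (> ) from text lines.
--
--     Three-state machine folded over the characters: at line start a '>'
--     enters skip mode; skip mode consumes further '>' and spaces; any other
--     character is emitted and switches to copy mode (newline resets to
--     line start).
--     """
--     out = []
--     state = 0  # 0 = line start, 1 = skipping after '>', 2 = copying
--     for c in text:
--         if state == 0 and c == ">":
--             state = 1
--             continue
--         if state == 1 and (c == ">" or c == " "):
--             continue
--         out.append(c)
--         state = 0 if c == "\n" else 2
--     return "".join(out)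
-- ===== Notes on version B (the rewrite author's own statement) =====
-- stated objective: alternative
-- what changed: Replaced the split-into-lines / per-line while-strip loop / rejoin pipeline with a single fold of a three-state machine (line-start / skipping-after-> / copying) over the characters, accumulating the output in reverse.
import Mathlib
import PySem

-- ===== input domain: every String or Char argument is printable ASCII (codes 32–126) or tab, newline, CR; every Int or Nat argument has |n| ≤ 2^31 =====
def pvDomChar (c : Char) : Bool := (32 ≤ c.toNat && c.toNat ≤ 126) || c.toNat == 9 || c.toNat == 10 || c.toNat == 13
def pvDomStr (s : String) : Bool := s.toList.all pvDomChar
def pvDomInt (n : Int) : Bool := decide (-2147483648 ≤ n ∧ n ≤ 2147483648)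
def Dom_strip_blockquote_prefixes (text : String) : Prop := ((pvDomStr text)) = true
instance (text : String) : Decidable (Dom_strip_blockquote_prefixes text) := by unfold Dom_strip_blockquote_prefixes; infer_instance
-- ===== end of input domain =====

-- B replaces A's split/per-line-while/join with a three-state machine folded once over the characters (alternative decomposition, same cost).


-- ===== PORT A =====
-- the 'while line.startswith(">"): line = line[1:].lstrip(" ")' loop of A
def stripLineA : List Char → List Char
  | [] => []
  | c :: rest =>
    if c = '>' then stripLineA (rest.dropWhile (· = ' '))
    else c :: rest
termination_by l => l.length
decreasing_by
  simpa using Nat.lt_succ_of_le (List.length_dropWhile_le _ _)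

def strip_blockquote_prefixes (text : String) : String :=
  String.mk (PySem.Chars.join ['\n']
    ((PySem.Chars.splitOn text.toList ['\n']).map stripLineA))

-- ===== PORT B =====
-- Source B's state machine: state 0 = line start, 1 = skipping after '>', 2 = copying;
-- the fold carries (state, reversed output) and the result is reversed at the end.
def stepB (sacc : Nat × List Char) (c : Char) : Nat × List Char :=
  if sacc.1 = 0 ∧ c = '>' then (1, sacc.2)
  else if sacc.1 = 1 ∧ (c = '>' ∨ c = ' ') then (1, sacc.2)
  else ((if c = '\n' then 0 else 2), c :: sacc.2)

def strip_blockquote_prefixes_alt (text : String) : String :=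
  String.mk ((text.toList.foldl stepB (0, [])).2.reverse)

-- ===== PRECONDITION & SPEC =====
def Spec_strip_blockquote_prefixes (text : String) (out : String) : Prop := out = strip_blockquote_prefixes_alt text
instance (text : String) (out : String) : Decidable (Spec_strip_blockquote_prefixes text out) := by unfold Spec_strip_blockquote_prefixes; infer_instance

-- ===== CLAIM (what is proved, stated in full; the proofs are below) =====
def Claim_equal_strip_blockquote_prefixes : Prop := ∀ (text : String), Dom_strip_blockquote_prefixes text → Spec_strip_blockquote_prefixes text (strip_blockquote_prefixes text)

-- ===== LEMMAS AND PROOFS =====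

-- proof-side functional form of B's fold (run st cs = output emitted from state st)
def runB (st : Nat) : List Char → List Char
  | [] => []
  | c :: rest =>
    if st = 0 ∧ c = '>' then runB 1 rest
    else if st = 1 ∧ (c = '>' ∨ c = ' ') then runB 1 rest
    else c :: runB (if c = '\n' then 0 else 2) rest

theorem foldl_stepB_eq_runB (cs : List Char) (st : Nat) (acc : List Char) :
    (cs.foldl stepB (st, acc)).2 = (runB st cs).reverse ++ acc := by
  induction cs generalizing st acc with
  | nil => simp [runB]
  | cons c rest ih =>
    simp only [List.foldl_cons, stepB, runB]
    by_cases h0 : st = 0 ∧ c = '>'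
    · simp only [if_pos h0, ih]
    · by_cases h1 : st = 1 ∧ (c = '>' ∨ c = ' ')
      · simp only [if_neg h0, if_pos h1, ih]
      · simp only [if_neg h0, if_neg h1, ih]
        simp

-- proof-side two-flag scan equivalent to runB (bridge towards A's per-line form)
def scanB (atStart : Bool) : List Char → List Char
  | [] => []
  | c :: rest =>
    if atStart ∧ c = '>' then scanB true (rest.dropWhile (· = ' '))
    else c :: scanB (c = '\n') rest
termination_by l => l.length
decreasing_by
  · simpa using Nat.lt_succ_of_le (List.length_dropWhile_le _ _)
  · simp

theorem runB_eq_scanB (n : Nat) :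
    ∀ l : List Char, l.length ≤ n →
      runB 0 l = scanB true l ∧ runB 2 l = scanB false l ∧
      runB 1 l = scanB true (l.dropWhile (· = ' ')) := by
  induction n with
  | zero =>
    intro l hl
    have : l = [] := List.eq_nil_of_length_eq_zero (Nat.le_zero.mp hl)
    subst this
    simp [runB, scanB, List.dropWhile]
  | succ n ih =>
    intro l hl
    cases l with
    | nil => simp [runB, scanB, List.dropWhile]
    | cons c rest =>
      have hr : rest.length ≤ n := by simpa using Nat.le_of_succ_le_succ hl
      obtain ⟨ih0, ih2, ih1⟩ := ih rest hr
      have htail : runB (if c = '\n' then 0 else 2) rest = scanB (c = '\n') rest := by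
        by_cases hn : c = '\n' <;> simp [hn, ih0, ih2]
      refine ⟨?_, ?_, ?_⟩
      · by_cases hc : c = '>'
        · subst hc
          simp only [runB, scanB]
          exact ih1
        · simp [runB, scanB, hc, htail]
      · simp [runB, scanB, htail]
      · by_cases hc : c = '>'
        · subst hc
          simp only [runB,
            show List.dropWhile (· = ' ') ('>' :: rest) = '>' :: rest by
              simp [List.dropWhile], scanB]
          exact ih1
        · by_cases hs : c = ' '
          · subst hs
            simp only [runB,
              show List.dropWhile (· = ' ') (' ' :: rest) =
                  List.dropWhile (· = ' ') rest by simp [List.dropWhile]]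
            exact ih1
          · rw [show List.dropWhile (· = ' ') (c :: rest) = c :: rest by
                simp [List.dropWhile, hs]]
            simp [runB, scanB, hc, hs, htail]

-- simple structural split on '\n' (proof-side model of PySem.Chars.splitOn · ['\n'])
def spNL : List Char → List (List Char)
  | [] => [[]]
  | c :: rest =>
    if c = '\n' then [] :: spNL rest
    else
      match spNL rest with
      | [] => [[c]]
      | p :: ps => (c :: p) :: ps

theorem spNL_ne_nil (l : List Char) : spNL l ≠ [] := by
  induction l with
  | nil => simp [spNL]
  | cons c rest ih =>
    simp only [spNL]
    split
    · simp
    · cases h : spNL rest <;> simp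

theorem splitOn_go_eq (fuel : Nat) (l cur : List Char) (acc : List (List Char))
    (hf : l.length < fuel) :
    PySem.Chars.splitOn.go ['\n'] fuel l cur acc =
      acc.reverse ++ (cur.reverse ++ (spNL l).headI) :: (spNL l).tail := by
  induction fuel generalizing l cur acc with
  | zero => omega
  | succ f ih =>
    cases l with
    | nil => simp [PySem.Chars.splitOn.go, spNL]
    | cons c rest =>
      by_cases hc : c = '\n'
      · subst hc
        have hpre : List.isPrefixOf ['\n'] ('\n' :: rest) = true := by
          simp [List.isPrefixOf]
        simp only [PySem.Chars.splitOn.go, hpre, if_pos, List.length_cons,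
          List.length_nil, List.drop_succ_cons, List.drop_zero]
        rw [ih rest [] (cur.reverse :: acc) (by simpa using Nat.lt_of_succ_lt_succ hf)]
        rcases h : spNL rest with _ | ⟨p, ps⟩
        · exact absurd h (spNL_ne_nil rest)
        · simp [spNL, h]
      · have hpre : List.isPrefixOf ['\n'] (c :: rest) = false := by
          simp [List.isPrefixOf]; exact fun h => absurd h.symm hc
        simp only [PySem.Chars.splitOn.go, hpre]
        rw [if_neg (by simp)]
        rw [ih rest (c :: cur) acc (by simpa using Nat.lt_of_succ_lt_succ hf)]
        rcases h : spNL rest with _ | ⟨p, ps⟩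
        · exact absurd h (spNL_ne_nil rest)
        · simp [spNL, hc, h]

theorem splitOn_eq_spNL (cs : List Char) :
    PySem.Chars.splitOn cs ['\n'] = spNL cs := by
  unfold PySem.Chars.splitOn
  rw [splitOn_go_eq (cs.length + 1) cs [] [] (by omega)]
  rcases h : spNL cs with _ | ⟨p, ps⟩
  · exact absurd h (spNL_ne_nil cs)
  · simp

theorem spNL_no_nl (l : List Char) (h : '\n' ∉ l) : spNL l = [l] := by
  induction l with
  | nil => rfl
  | cons c rest ih =>
    simp only [List.mem_cons, not_or] at h
    simp [spNL, Ne.symm h.1, ih h.2]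

theorem spNL_append (l rest : List Char) (h : '\n' ∉ l) :
    spNL (l ++ '\n' :: rest) = l :: spNL rest := by
  induction l with
  | nil => simp [spNL]
  | cons c t ih =>
    simp only [List.mem_cons, not_or] at h
    simp [spNL, Ne.symm h.1, ih h.2]

theorem dropWhile_space_append (t rest : List Char) :
    List.dropWhile (· = ' ') (t ++ '\n' :: rest) =
      List.dropWhile (· = ' ') t ++ '\n' :: rest := by
  induction t with
  | nil => simp [List.dropWhile]
  | cons c t ih =>
    by_cases hc : c = ' ' <;> simp [List.dropWhile, hc, ih]

theorem scanB_false_no_nl (l : List Char) (h : '\n' ∉ l) : scanB false l = l := by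
  induction l with
  | nil => simp [scanB]
  | cons c rest ih =>
    simp only [List.mem_cons, not_or] at h
    have hd : decide (c = '\n') = false := by
      simp only [decide_eq_false_iff_not]; exact fun hc => h.1 hc.symm
    simp [scanB, hd, ih h.2]

theorem scanB_false_append (l rest : List Char) (h : '\n' ∉ l) :
    scanB false (l ++ '\n' :: rest) = l ++ '\n' :: scanB true rest := by
  induction l with
  | nil => simp [scanB]
  | cons c t ih =>
    simp only [List.mem_cons, not_or] at h
    have hd : decide (c = '\n') = false := by
      simp only [decide_eq_false_iff_not]; exact fun hc => h.1 hc.symm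
    simp [scanB, hd, ih h.2]

theorem not_nl_dropWhile {l : List Char} (h : '\n' ∉ l) :
    '\n' ∉ List.dropWhile (· = ' ') l :=
  fun hm => h ((List.dropWhile_sublist _).mem hm)

theorem scanB_true_no_nl (l : List Char) (h : '\n' ∉ l) :
    scanB true l = stripLineA l := by
  induction hl : l.length using Nat.strong_induction_on generalizing l with
  | _ n ih =>
    cases l with
    | nil => simp [scanB, stripLineA]
    | cons c rest =>
      simp only [List.mem_cons, not_or] at h
      by_cases hc : c = '>'
      · subst hc
        rw [scanB, if_pos (by simp), stripLineA, if_pos rfl]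
        exact ih _ (by subst hl; simpa using
            Nat.lt_succ_of_le (List.length_dropWhile_le _ _))
          _ (not_nl_dropWhile h.2) rfl
      · have hd : decide (c = '\n') = false := by
          simp only [decide_eq_false_iff_not]; exact fun hp => h.1 hp.symm
        rw [scanB, if_neg (by simp [hc]), stripLineA, if_neg hc, hd,
          scanB_false_no_nl rest h.2]

theorem scanB_true_append (l rest : List Char) (h : '\n' ∉ l) :
    scanB true (l ++ '\n' :: rest) = stripLineA l ++ '\n' :: scanB true rest := by
  induction hl : l.length using Nat.strong_induction_on generalizing l with
  | _ n ih =>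
    cases l with
    | nil => simp [scanB, stripLineA]
    | cons c t =>
      simp only [List.mem_cons, not_or] at h
      by_cases hc : c = '>'
      · subst hc
        rw [List.cons_append, scanB, if_pos (by simp), stripLineA, if_pos rfl,
          dropWhile_space_append]
        exact ih _ (by subst hl; simpa using
            Nat.lt_succ_of_le (List.length_dropWhile_le _ _))
          _ (not_nl_dropWhile h.2) rfl
      · have hd : decide (c = '\n') = false := by
          simp only [decide_eq_false_iff_not]; exact fun hp => h.1 hp.symm
        rw [List.cons_append, scanB, if_neg (by simp [hc]), stripLineA, if_neg hc, hd,
          scanB_false_append t rest h.2]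
        simp

theorem exists_first_nl (cs : List Char) (h : '\n' ∈ cs) :
    ∃ l rest, cs = l ++ '\n' :: rest ∧ '\n' ∉ l := by
  induction cs with
  | nil => simp at h
  | cons c t ih =>
    by_cases hc : c = '\n'
    · exact ⟨[], t, by simp [hc], by simp⟩
    · obtain ⟨l, r, h1, h2⟩ := ih (by
        rcases List.mem_cons.mp h with h | h
        · exact absurd h.symm hc
        · exact h)
      refine ⟨c :: l, r, by simp [h1], ?_⟩
      simp only [List.mem_cons, not_or]
      exact ⟨fun hp => hc hp.symm, h2⟩

theorem scanB_eq_join (cs : List Char) :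
    scanB true cs = PySem.Chars.join ['\n'] ((spNL cs).map stripLineA) := by
  induction hl : cs.length using Nat.strong_induction_on generalizing cs with
  | _ n ih =>
    by_cases hnl : '\n' ∈ cs
    · obtain ⟨l, rest, hcs, hnot⟩ := exists_first_nl cs hnl
      subst hcs
      rw [scanB_true_append l rest hnot, spNL_append l rest hnot]
      rcases hsp : spNL rest with _ | ⟨p, ps⟩
      · exact absurd hsp (spNL_ne_nil rest)
      · simp only [List.map_cons]
        rw [PySem.Chars.join_cons_cons,
          ih rest.length (by subst hl; simp; omega) rest rfl, hsp]
        simp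
    · rw [scanB_true_no_nl cs hnl, spNL_no_nl cs hnl]
      simp [PySem.Chars.join_singleton]

-- ===== VERDICT (by name: the statement is the Claim_ definition above) =====
theorem strip_blockquote_prefixes_spec : Claim_equal_strip_blockquote_prefixes := by
  intro text _
  unfold Spec_strip_blockquote_prefixes strip_blockquote_prefixes strip_blockquote_prefixes_alt
  rw [splitOn_eq_spNL, ← scanB_eq_join, foldl_stepB_eq_runB,
    (runB_eq_scanB text.toList.length text.toList le_rfl).1]
  simp
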